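-- pv_equiv track=rewrite | github.com/Tecnico-Investment-Club/tic-engine-py | src/trading_pod/strategy/ml4f/functions/Chapter_18.py | lempelZiv_lib
-- ===== SOURCE A (Python) =====
-- def lempelZiv_lib(msg):
--     i,lib=1,[msg[0]]
--     while i<len(msg):
--         for j in range(i,len(msg)):
--             msg_=msg[i:j+1]
--             if msg_ not in lib:
--                 lib.append(msg_)
--                 break
--         i=j+1
--     return lib
-- ===== SOURCE B (Python) =====
-- def lempelZiv_lib(msg):
--     lib = [msg[0]]
--     w = ""
--     for c in msg[1:]:
--         w += c
--         if w not in lib: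
--             lib.append(w)
--             w = ""
--     return lib
-- ===== Notes on version B (the rewrite author's own statement) =====
-- stated objective: idiomatic
-- what changed: Replaced A's outer while over start positions with nested re-slicing for-loop by a single linear scan that maintains a growing phrase buffer w, appending w to the library and resetting it whenever it is new (the trailing incomplete phrase is dropped, as in A).
import Mathlib
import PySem

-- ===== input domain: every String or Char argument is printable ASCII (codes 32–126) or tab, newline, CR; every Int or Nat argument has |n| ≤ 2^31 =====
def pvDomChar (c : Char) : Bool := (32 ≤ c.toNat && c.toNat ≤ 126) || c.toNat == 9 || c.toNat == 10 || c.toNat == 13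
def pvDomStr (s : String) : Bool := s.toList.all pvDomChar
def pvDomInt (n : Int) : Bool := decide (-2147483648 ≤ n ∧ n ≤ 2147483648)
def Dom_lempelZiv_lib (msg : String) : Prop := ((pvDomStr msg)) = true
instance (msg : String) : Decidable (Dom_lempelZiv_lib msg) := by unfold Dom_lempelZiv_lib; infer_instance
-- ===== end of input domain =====

-- B replaces A's while-over-start-positions with nested re-slicing for-loop by one linear scan
-- maintaining a growing phrase buffer (idiomatic, same trailing-phrase-dropping behaviour).

-- ===== PORT A =====
-- inner 'for j in range(i, len(msg))': tries growing slices msg[i:j+1]; on the first one not in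
-- lib it appends and breaks; returns (lib, j+1) = (lib, next i).  If the loop exhausts, Python's
-- last j is len(msg)-1 and i becomes j+1 = len(msg): the fall-through branch returns (lib, j)
-- which is only reached at j = msg.length.
def lzForA (msg : List Char) (i : Nat) (lib : List String) (j : Nat) : List String × Nat :=
  if _h : j < msg.length then
    let msg_ := String.ofList (PySem.List.slice msg (some (i : Int)) (some ((j + 1 : Nat) : Int)))
    if msg_ ∉ lib then (lib ++ [msg_], j + 1)
    else lzForA msg i lib (j + 1)
  else (lib, j)
termination_by msg.length - j

-- progress fact the while-loop's termination cites
theorem lzForA_snd_lt (msg : List Char) (i : Nat) (lib : List String) (j : Nat)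
    (h : j < msg.length) : j < (lzForA msg i lib j).2 := by
  rw [lzForA]
  simp only [h, dif_pos]
  split
  · exact Nat.lt_succ_self j
  · by_cases h2 : j + 1 < msg.length
    · exact Nat.lt_trans (Nat.lt_succ_self j) (lzForA_snd_lt msg i lib (j + 1) h2)
    · rw [lzForA]; simp only [h2, dif_neg, not_false_iff]; omega
termination_by msg.length - j

-- 'while i < len(msg)'
def lzWhileA (msg : List Char) (i : Nat) (lib : List String) : List String :=
  if h : i < msg.length then
    let r := lzForA msg i lib i
    lzWhileA msg r.2 r.1
  else lib
termination_by msg.length - i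
decreasing_by have := lzForA_snd_lt msg i lib i h; omega

def lempelZiv_lib (msg : String) : List String :=
  match msg.toList with
  | [] => []   -- Python raises IndexError on msg[0]; excluded by Pre_
  | c :: _ => lzWhileA msg.toList 1 [String.ofList [c]]

-- ===== PORT B =====
-- single scan: w is the growing current phrase, reset whenever it is new and appended
def lzScanB (lib : List String) (w : List Char) (rest : List Char) : List String :=
  match rest with
  | [] => lib
  | c :: cs =>
    let w' := w ++ [c]
    if String.ofList w' ∉ lib then lzScanB (lib ++ [String.ofList w']) [] cs
    else lzScanB lib w' cs

def lempelZiv_lib_alt (msg : String) : List String :=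
  match msg.toList with
  | [] => []   -- Python raises IndexError on msg[0]; excluded by Pre_
  | c :: cs => lzScanB [String.ofList [c]] [] cs

-- ===== PRECONDITION & SPEC =====
-- Pre_ excludes only the empty string, on which Python A raises IndexError (msg[0]).
def Pre_lempelZiv_lib (msg : String) : Prop := msg.toList ≠ []
instance (msg : String) : Decidable (Pre_lempelZiv_lib msg) := by unfold Pre_lempelZiv_lib; infer_instance
def pvWitness_lempelZiv_lib : String := "abab"

def Spec_lempelZiv_lib (msg : String) (out : List String) : Prop := out = lempelZiv_lib_alt msg
instance (msg : String) (out : List String) : Decidable (Spec_lempelZiv_lib msg out) := by unfold Spec_lempelZiv_lib; infer_instance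

-- ===== CLAIM (what is proved, stated in full; the proofs are below) =====
def Claim_equal_lempelZiv_lib : Prop := ∀ (msg : String), Dom_lempelZiv_lib msg → Pre_lempelZiv_lib msg → Spec_lempelZiv_lib msg (lempelZiv_lib msg)

-- ===== LEMMAS AND PROOFS =====

-- Loop correspondence: A inside the inner for-loop at position j, having started the current
-- phrase at i, matches B with buffer w = msg[i:j] and remaining input msg[j:].
theorem lz_loop_eq (msg : List Char) (j i : Nat) (lib : List String)
    (hij : i ≤ j) (hj : j ≤ msg.length) :
    lzWhileA msg (lzForA msg i lib j).2 (lzForA msg i lib j).1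
      = lzScanB lib ((msg.drop i).take (j - i)) (msg.drop j) := by
  by_cases h : j < msg.length
  · rw [lzForA]
    simp only [h, dif_pos]
    have hdrop : msg.drop j = msg[j] :: msg.drop (j + 1) := List.drop_eq_getElem_cons h
    have hslice : PySem.List.slice msg (some (i : Int)) (some ((j + 1 : Nat) : Int))
        = (msg.drop i).take (j + 1 - i) := PySem.List.slice_natCast msg i (j + 1)
    have htake : (msg.drop i).take (j - i) ++ [msg[j]] = (msg.drop i).take (j + 1 - i) := by
    -- buffer grown by one char = slice grown by one char
      have h1 : j + 1 - i = (j - i) + 1 := by omega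
      have h2 : (msg.drop i)[j - i]? = some msg[j] := by
        rw [List.getElem?_drop]
        have : i + (j - i) = j := by omega
        rw [this, List.getElem?_eq_getElem h]
      rw [h1, List.take_add_one, h2]
      simp
    rw [hdrop]
    simp only [lzScanB]
    rw [hslice] at *
    rw [htake]
    split_ifs with hmem
    · -- phrase already known: A grows the slice (j+1); B grows the buffer
      have := lz_loop_eq msg (j + 1) i lib (by omega) (by omega)
      simpa using this
    · -- new phrase: A appends and restarts the while-loop at i = j+1; B appends and resets w
      rw [lzWhileA]
      by_cases h2 : j + 1 < msg.length
      · simp only [h2]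
        have := lz_loop_eq msg (j + 1) (j + 1)
          (lib ++ [String.ofList ((msg.drop i).take (j + 1 - i))]) (le_refl _) (by omega)
        simpa using this
      · simp only [h2]
        rw [show msg.drop (j + 1) = [] from List.drop_eq_nil_of_le (by omega)]
        rfl
  · -- loop exhausted: j = msg.length
    rw [lzForA]
    simp only [h, dif_neg, not_false_iff]
    rw [lzWhileA]
    simp only [h, dif_neg, not_false_iff]
    rw [show msg.drop j = [] from List.drop_eq_nil_of_le (by omega)]
    rfl
termination_by msg.length - j

-- ===== VERDICT (by name: the statement is the Claim_ definition above) =====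
theorem lempelZiv_lib_spec : Claim_equal_lempelZiv_lib := by
  intro msg _ hpre
  unfold Spec_lempelZiv_lib lempelZiv_lib lempelZiv_lib_alt
  cases hm : msg.toList with
  | nil => exact absurd hm hpre
  | cons c cs =>
    simp only []
    rw [lzWhileA]
    by_cases h1 : 1 < (c :: cs).length
    · simp only [h1, dif_pos]
      have := lz_loop_eq (c :: cs) 1 1 [String.ofList [c]] (le_refl _) (by omega)
      simpa using this
    · have hcs : cs = [] := by
        simp only [List.length_cons] at h1
        exact List.eq_nil_of_length_eq_zero (by omega)
      subst hcs
      simp only [List.length_cons, List.length_nil]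
      norm_num
      rfl
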